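-- pv_equiv track=rewrite | github.com/Devagio/sorting_visualiser | selection.py | get_colour_array
-- ===== SOURCE A (Python) =====
-- def get_colour_array(data_len, i, j, min_index, is_swapping=False):
--     colour_array = []
--     for k in range(data_len):
--         if k < i:
--             colour_array.append("green")
--         elif k == i:
--             colour_array.append("yellow")
--         elif k == min_index:
--             colour_array.append("blue")
--         elif k == j:
--             colour_array.append("pink")
--         else:
--             colour_array.append("gray")
--
--         if is_swapping:
--             if k == j or k == min_index:
--                 colour_array[k] = "red"
--     return colour_array
-- ===== SOURCE B (Python) =====
-- def get_colour_array(data_len, i, j, min_index, is_swapping=False):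
--     # build-then-patch: start all gray, patch in reverse priority, red last
--     colour_array = ["gray"] * data_len
--     n = len(colour_array)
--     for idx, col in ((j, "pink"), (min_index, "blue"), (i, "yellow")):
--         if 0 <= idx < n:
--             colour_array[idx] = col
--     g = min(max(i, 0), n)
--     colour_array[:g] = ["green"] * g
--     if is_swapping:
--         for idx in (j, min_index):
--             if 0 <= idx < n:
--                 colour_array[idx] = "red"
--     return colour_array
-- ===== Notes on version B (the rewrite author's own statement) =====
-- stated objective: alternative
-- what changed: Replaces the per-element elif-classification loop with a build-then-patch strategy: an all-gray array patched at single indices in reverse priority order (pink, blue, yellow), a green prefix slice-assignment, and red patches last when swapping.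
import Mathlib
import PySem

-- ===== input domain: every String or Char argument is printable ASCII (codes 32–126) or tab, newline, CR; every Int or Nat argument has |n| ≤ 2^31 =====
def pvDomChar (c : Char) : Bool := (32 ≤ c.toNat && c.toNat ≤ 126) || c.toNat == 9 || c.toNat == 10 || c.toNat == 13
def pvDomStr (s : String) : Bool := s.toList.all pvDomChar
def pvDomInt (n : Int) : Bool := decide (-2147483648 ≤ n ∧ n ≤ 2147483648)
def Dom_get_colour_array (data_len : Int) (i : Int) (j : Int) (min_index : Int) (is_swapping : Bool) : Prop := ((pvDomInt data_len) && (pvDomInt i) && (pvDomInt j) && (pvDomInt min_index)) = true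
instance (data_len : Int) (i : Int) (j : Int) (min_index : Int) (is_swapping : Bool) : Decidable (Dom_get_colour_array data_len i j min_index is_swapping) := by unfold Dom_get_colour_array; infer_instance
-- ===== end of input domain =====

-- B replaces A's per-element elif-classification loop by a build-then-patch strategy
-- (all-gray array, single-index patches in reverse priority, green prefix slice, red last); objective: alternative.


-- ===== PORT A =====
-- literal transliteration of A: one loop over range(data_len), elif chain appends,
-- then colour_array[k] = "red" (pySetD; k is always in range, so the total form is exact)
def get_colour_array (data_len : Int) (i : Int) (j : Int) (min_index : Int) (is_swapping : Bool) : List String :=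
  (PySem.List.pyRange 0 data_len 1).foldl (fun colour_array k =>
    let colour_array := colour_array ++
      [if k < i then "green" else if k = i then "yellow"
       else if k = min_index then "blue" else if k = j then "pink" else "gray"]
    if is_swapping then
      if k = j ∨ k = min_index then PySem.List.pySetD colour_array k "red" else colour_array
    else colour_array) []

-- ===== PORT B =====
-- literal transliteration of B (Source B): ["gray"]*data_len, guarded single-index patches
-- (pink, blue, yellow), green prefix slice-assignment, red patches last when swapping
def get_colour_array_alt (data_len : Int) (i : Int) (j : Int) (min_index : Int) (is_swapping : Bool) : List String :=
  let colour_array := List.replicate data_len.toNat "gray"   -- ["gray"] * data_len (negative → empty)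
  let n : Int := (colour_array.length : Int)
  let colour_array := if 0 ≤ j ∧ j < n then PySem.List.pySetD colour_array j "pink" else colour_array
  let colour_array := if 0 ≤ min_index ∧ min_index < n then PySem.List.pySetD colour_array min_index "blue" else colour_array
  let colour_array := if 0 ≤ i ∧ i < n then PySem.List.pySetD colour_array i "yellow" else colour_array
  let g := min (max i 0) n
  -- colour_array[:g] = ["green"] * g
  let colour_array := List.replicate g.toNat "green" ++ colour_array.drop g.toNat
  if is_swapping then
    let colour_array := if 0 ≤ j ∧ j < n then PySem.List.pySetD colour_array j "red" else colour_array
    if 0 ≤ min_index ∧ min_index < n then PySem.List.pySetD colour_array min_index "red" else colour_array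
  else colour_array

-- ===== PRECONDITION & SPEC =====
def Spec_get_colour_array (data_len : Int) (i : Int) (j : Int) (min_index : Int) (is_swapping : Bool) (out : List String) : Prop := out = get_colour_array_alt data_len i j min_index is_swapping
instance (data_len : Int) (i : Int) (j : Int) (min_index : Int) (is_swapping : Bool) (out : List String) : Decidable (Spec_get_colour_array data_len i j min_index is_swapping out) := by unfold Spec_get_colour_array; infer_instance

-- ===== CLAIM (what is proved, stated in full; the proofs are below) =====
def Claim_equal_get_colour_array : Prop := ∀ (data_len : Int) (i : Int) (j : Int) (min_index : Int) (is_swapping : Bool), Dom_get_colour_array data_len i j min_index is_swapping → Spec_get_colour_array data_len i j min_index is_swapping (get_colour_array data_len i j min_index is_swapping)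

-- ===== LEMMAS AND PROOFS =====

-- the colour A's elif chain (with the red override) assigns to position k
def pvColour (i j m : Int) (s : Bool) (k : Int) : String :=
  if s = true ∧ (k = j ∨ k = m) then "red"
  else if k < i then "green" else if k = i then "yellow"
  else if k = m then "blue" else if k = j then "pink" else "gray"

lemma A_loop (i j m : Int) (s : Bool) (n : Nat) :
    get_colour_array (n : Int) i j m s = (List.range n).map (fun (k : Nat) => pvColour i j m s (k : Int)) := by
  unfold get_colour_array
  induction n with
  | zero => simp [PySem.List.pyRange]
  | succ nn ih =>
      have h : PySem.List.pyRange 0 ((nn : Int) + 1) 1 = PySem.List.pyRange 0 (nn : Int) 1 ++ [(nn : Int)] :=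
        PySem.List.pyRange_one_succ_right (by omega)
      rw [show (((nn + 1 : Nat)) : Int) = (nn : Int) + 1 by push_cast; ring]
      rw [h, List.foldl_append, ih, List.range_succ, List.map_append]
      simp only [List.foldl_cons, List.foldl_nil, List.map_cons, List.map_nil]
      by_cases hs : s = true
      · subst hs
        by_cases hr : (nn : Int) = j ∨ (nn : Int) = m
        · simp only [hr, if_pos]
          rw [PySem.List.pySetD_natCast]
          rw [List.set_append_right _ _ (by simp)]
          simp [pvColour, hr]
        · simp [hr, pvColour]
      · simp only [Bool.not_eq_true] at hs
        subst hs
        simp [pvColour]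

lemma patch_map_range {α : Type} (n : Nat) (idx : Int) (v : α) (f : Nat → α) :
    (if 0 ≤ idx ∧ idx < (n : Int) then PySem.List.pySetD ((List.range n).map f) idx v
     else (List.range n).map f) =
    (List.range n).map (fun (k : Nat) => if (k : Int) = idx then v else f k) := by
  split
  · next h =>
    rw [PySem.List.pySetD_of_nonneg ((List.range n).map f) v h.1]
    apply List.ext_getElem
    · simp
    · intro k h1 h2
      simp only [List.getElem_set, List.getElem_map, List.getElem_range]
      simp only [List.length_set, List.length_map, List.length_range] at h1
      have : idx.toNat = k ↔ (k : Int) = idx := by omega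
      split <;> split <;> simp_all
  · next h =>
    apply (List.map_congr_left ?_).symm
    intro k hk
    have hk' : k < n := List.mem_range.mp hk
    rw [if_neg (by omega)]

lemma green_map_range {α : Type} (n : Nat) (i : Int) (v : α) (f : Nat → α) :
    List.replicate (min (max i 0) (n : Int)).toNat v ++
      ((List.range n).map f).drop (min (max i 0) (n : Int)).toNat =
    (List.range n).map (fun (k : Nat) => if (k : Int) < i then v else f k) := by
  set g : Nat := (min (max i 0) (n : Int)).toNat with hg
  have hgn : g ≤ n := by omega
  apply List.ext_getElem
  · simp; omega
  · intro k h1 h2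
    simp only [List.length_map, List.length_range] at h2
    by_cases hkg : k < g
    · rw [List.getElem_append_left (by simpa)]
      simp only [List.getElem_replicate, List.getElem_map, List.getElem_range]
      rw [if_pos (by omega)]
    · rw [List.getElem_append_right (by simpa using hkg)]
      simp only [List.length_replicate, List.getElem_drop, List.getElem_map, List.getElem_range]
      have : g + (k - g) = k := by omega
      rw [this, if_neg (by omega)]

lemma replicate_eq_map_range {α : Type} (n : Nat) (v : α) :
    List.replicate n v = (List.range n).map (fun _ => v) := by
  simp

lemma B_loop (d i j m : Int) (s : Bool) :
    get_colour_array_alt d i j m s = (List.range d.toNat).map (fun (k : Nat) => pvColour i j m s (k : Int)) := by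
  unfold get_colour_array_alt
  simp only [List.length_replicate]
  rw [replicate_eq_map_range d.toNat "gray", patch_map_range d.toNat j "pink",
     patch_map_range d.toNat m "blue", patch_map_range d.toNat i "yellow"]
  cases s with
  | false =>
      simp only [Bool.false_eq_true, if_false]
      rw [green_map_range d.toNat i "green"]
      apply List.map_congr_left
      intro k hk
      have hk' : k < d.toNat := List.mem_range.mp hk
      simp only [pvColour]
      split_ifs <;> first | rfl | omega | simp_all
  | true =>
      simp only [if_true]
      rw [green_map_range d.toNat i "green", patch_map_range d.toNat j "red", patch_map_range d.toNat m "red"]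
      apply List.map_congr_left
      intro k hk
      have hk' : k < d.toNat := List.mem_range.mp hk
      simp only [pvColour]
      split_ifs <;> first | rfl | omega | simp_all

lemma A_norm (d i j m : Int) (s : Bool) :
    get_colour_array d i j m s = (List.range d.toNat).map (fun (k : Nat) => pvColour i j m s (k : Int)) := by
  by_cases hd : 0 ≤ d
  · have h := A_loop i j m s d.toNat
    rwa [Int.toNat_of_nonneg hd] at h
  · have h0 : d.toNat = 0 := by omega
    unfold get_colour_array
    rw [h0]
    have : PySem.List.pyRange 0 d 1 = [] := by simp [PySem.List.pyRange]; omega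
    rw [this]
    simp

-- ===== VERDICT (by name: the statement is the Claim_ definition above) =====
theorem get_colour_array_spec : Claim_equal_get_colour_array := by
  intro data_len i j min_index is_swapping _
  unfold Spec_get_colour_array
  rw [A_norm, B_loop]
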